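-- pv_equiv track=rewrite | github.com/BelminOruc/chaosEngineering | CleverBruteKiller.py | remove_redundant_sublists
-- ===== SOURCE A (Python) =====
-- def remove_redundant_sublists(lst):
--     result = []  # To store non-redundant sublists
--
--     for i in range(len(lst)):
--         current_sublist = lst[i]
--
--         # Step 1: Collect all tuples from other sublists except the current one
--         other_tuples = set()
--         for j in range(len(lst)):
--             if i != j:
--                 other_tuples.update(lst[j])  # Add all tuples from other sublists to the set
--
--         # Step 2: Check if the current sublist is redundant
--         is_redundant = all(tup in other_tuples for tup in current_sublist)
--
--         # Step 3: If the current sublist is not redundant, keep it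
--         if not is_redundant:
--             result.append(current_sublist)
--
--     return result
--
--     # Example usage:
--
--     return True
-- ===== SOURCE B (Python) =====
-- def remove_redundant_sublists(lst):
--     # Count, for each tuple, in how many sublists it occurs (each sublist once).
--     counts = {}
--     for sub in lst:
--         for tup in set(sub):
--             counts[tup] = counts.get(tup, 0) + 1
--     # A sublist is redundant iff each of its tuples also occurs in another sublist,
--     # i.e. every tuple's containing-sublist count exceeds 1.
--     return [sub for sub in lst if not all(counts.get(tup, 0) > 1 for tup in sub)]
-- ===== Notes on version B (the rewrite author's own statement) =====
-- stated objective: faster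
-- what changed: B replaces A's per-sublist rebuild of the set of all tuples in the other sublists by a single precomputed tuple -> containing-sublist-count map, keeping a sublist iff some of its tuples has count 1.
import Mathlib
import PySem

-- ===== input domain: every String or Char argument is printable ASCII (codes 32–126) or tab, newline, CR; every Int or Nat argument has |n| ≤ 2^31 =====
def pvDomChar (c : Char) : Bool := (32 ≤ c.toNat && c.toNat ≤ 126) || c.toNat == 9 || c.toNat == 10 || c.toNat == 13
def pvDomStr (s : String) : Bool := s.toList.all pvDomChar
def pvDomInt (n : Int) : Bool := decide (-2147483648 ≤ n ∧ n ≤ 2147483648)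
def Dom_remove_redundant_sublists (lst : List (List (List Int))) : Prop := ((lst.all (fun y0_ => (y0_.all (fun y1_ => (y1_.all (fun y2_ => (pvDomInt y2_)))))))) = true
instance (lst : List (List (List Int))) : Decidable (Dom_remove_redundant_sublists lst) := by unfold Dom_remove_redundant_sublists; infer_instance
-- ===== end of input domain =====

-- B replaces A's per-sublist rescan of all other sublists by one precomputed
-- tuple -> containing-sublist count, tested per sublist (objective: faster).


-- ===== PORT A =====
def remove_redundant_sublists (lst : List (List (List Int))) : List (List (List Int)) :=
  (PySem.List.pyRange 0 (lst.length : Int) 1).foldl (fun result i =>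
    let current_sublist := PySem.List.pyGetD lst i []
    let other_tuples := (PySem.List.pyRange 0 (lst.length : Int) 1).foldl
      (fun s j => if i ≠ j then PySem.Set.update s (PySem.List.pyGetD lst j []) else s)
      PySem.Set.empty
    let is_redundant := current_sublist.all (fun tup => PySem.Set.contains other_tuples tup)
    if !is_redundant then result ++ [current_sublist] else result) []

-- ===== PORT B =====
def remove_redundant_sublists_alt (lst : List (List (List Int))) : List (List (List Int)) :=
  let counts : PySem.Dict (List Int) Int := lst.foldl (fun d sub =>
    (PySem.Set.ofList sub).foldl (fun d tup => PySem.Dict.modify d tup 0 (· + 1)) d)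
    PySem.Dict.empty
  lst.filter (fun sub => !(sub.all (fun tup => decide (1 < PySem.Dict.getD counts tup 0))))

-- ===== PRECONDITION & SPEC =====
def Spec_remove_redundant_sublists (lst : List (List (List Int))) (out : List (List (List Int))) : Prop := out = remove_redundant_sublists_alt lst
instance (lst : List (List (List Int))) (out : List (List (List Int))) : Decidable (Spec_remove_redundant_sublists lst out) := by unfold Spec_remove_redundant_sublists; infer_instance

-- ===== CLAIM (what is proved, stated in full; the proofs are below) =====
def Claim_equal_remove_redundant_sublists : Prop := ∀ (lst : List (List (List Int))), Dom_remove_redundant_sublists lst → Spec_remove_redundant_sublists lst (remove_redundant_sublists lst)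

-- ===== LEMMAS AND PROOFS =====

-- number of sublists of lst containing tup (counted once per sublist)
def pvCnt (lst : List (List (List Int))) (tup : List Int) : Nat :=
  lst.countP (fun sub => decide (tup ∈ sub))

-- the "keep" predicate both programs decide: some tuple occurs in no other sublist
def pvKeep (lst : List (List (List Int))) (sub : List (List Int)) : Bool :=
  !(sub.all (fun tup => decide (2 ≤ pvCnt lst tup)))

-- A's inner set of all tuples of the other sublists
def pvOther (lst : List (List (List Int))) (i : Int) : PySem.Set (List Int) :=
  (PySem.List.pyRange 0 (lst.length : Int) 1).foldl
    (fun s j => if i ≠ j then PySem.Set.update s (PySem.List.pyGetD lst j []) else s)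
    PySem.Set.empty

-- A's keep test at index i
def pvKeepA (lst : List (List (List Int))) (i : Int) : Bool :=
  !((PySem.List.pyGetD lst i []).all (fun tup => PySem.Set.contains (pvOther lst i) tup))

lemma pv_all_congr {α : Type} (l : List α) (f g : α → Bool) (h : ∀ x ∈ l, f x = g x) :
    l.all f = l.all g := by
  induction l with
  | nil => rfl
  | cons a t ih =>
    simp only [List.all_cons, h a (by simp), ih (fun x hx => h x (by simp [hx]))]

lemma pv_pyRange_cast (n : Nat) :
    PySem.List.pyRange 0 (n : Int) 1 = (List.range n).map (Nat.cast : Nat → Int) := by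
  rw [PySem.List.pyRange_one]
  simp

lemma pv_count_flat (lst : List (List (List Int))) (tup : List Int) :
    (lst.flatMap (fun sub => PySem.Set.ofList sub)).count tup = pvCnt lst tup := by
  induction lst with
  | nil => simp [pvCnt]
  | cons a t ih =>
    simp only [List.flatMap_cons, List.count_append, pvCnt, List.countP_cons] at *
    by_cases h : tup ∈ a
    · rw [List.count_eq_one_of_mem (PySem.Set.nodup_ofList a) ((PySem.Set.mem_ofList a tup).mpr h)]
      simp [h, ih, Nat.add_comm]
    · rw [List.count_eq_zero.mpr (fun hm => h ((PySem.Set.mem_ofList a tup).mp hm))]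
      simp [h, ih]

lemma pvB_eq (lst : List (List (List Int))) :
    remove_redundant_sublists_alt lst = lst.filter (pvKeep lst) := by
  unfold remove_redundant_sublists_alt
  rw [show (lst.foldl (fun d sub =>
        (PySem.Set.ofList sub).foldl (fun d tup => PySem.Dict.modify d tup 0 (· + 1)) d)
        PySem.Dict.empty)
      = PySem.Dict.counter (lst.flatMap (fun sub => PySem.Set.ofList sub)) from
    (List.foldl_flatMap).symm]
  apply List.filter_congr
  intro sub _
  show (!(sub.all _)) = pvKeep lst sub
  unfold pvKeep
  congr 1
  apply pv_all_congr
  intro tup _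
  rw [PySem.Dict.getD_counter, pv_count_flat]
  apply decide_eq_decide.mpr
  constructor
  · intro h; exact_mod_cast h
  · intro h; exact_mod_cast h

lemma pv_mem_other (i : Int) (lst : List (List (List Int))) :
    ∀ (L : List Int) (s : PySem.Set (List Int)) (tup : List Int),
    (tup ∈ L.foldl (fun s j => if i ≠ j then PySem.Set.update s (PySem.List.pyGetD lst j []) else s) s)
    ↔ tup ∈ s ∨ ∃ j ∈ L, j ≠ i ∧ tup ∈ PySem.List.pyGetD lst j []
  | [], s, tup => by simp
  | j :: L, s, tup => by
    simp only [List.foldl_cons]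
    rw [pv_mem_other i lst L]
    by_cases h : i = j
    · subst h; simp only [ne_eq, not_true_eq_false, if_false, List.mem_cons]
      constructor
      · rintro (hs | ⟨j', hj', hji, hm⟩)
        · exact Or.inl hs
        · exact Or.inr ⟨j', Or.inr hj', hji, hm⟩
      · rintro (hs | ⟨j', (rfl | hj'), hji, hm⟩)
        · exact Or.inl hs
        · exact absurd rfl hji
        · exact Or.inr ⟨j', hj', hji, hm⟩
    · simp only [ne_eq, h, not_false_eq_true, if_true, PySem.Set.mem_update, List.mem_cons]
      constructor
      · rintro (⟨hs | hj⟩ | ⟨j', hj', hji, hm⟩)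
        · exact Or.inl hs
        · exact Or.inr ⟨j, Or.inl rfl, fun hji => h hji.symm, hj⟩
        · exact Or.inr ⟨j', Or.inr hj', hji, hm⟩
      · rintro (hs | ⟨j', (rfl | hj'), hji, hm⟩)
        · exact Or.inl (Or.inl hs)
        · exact Or.inl (Or.inr hm)
        · exact Or.inr ⟨j', hj', hji, hm⟩

lemma pv_count_two (tup : List Int) :
    ∀ (lst : List (List (List Int))) (m : Nat), m < lst.length → tup ∈ lst.getD m [] →
    ((∃ k, k < lst.length ∧ k ≠ m ∧ tup ∈ lst.getD k []) ↔ 2 ≤ pvCnt lst tup)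
  | [], m, hm, _ => by simp at hm
  | a :: t, 0, hm, hmem => by
    simp only [List.getD_cons_zero] at hmem
    have hcnt : pvCnt (a :: t) tup = pvCnt t tup + 1 := by
      simp [pvCnt, hmem]
    rw [hcnt]
    constructor
    · rintro ⟨k, hk, hk0, hkm⟩
      rcases k with _ | k
      · exact absurd rfl hk0
      · simp only [List.getD_cons_succ] at hkm
        have hpos : 0 < pvCnt t tup := by
          rw [pvCnt, List.countP_pos_iff]
          refine ⟨t.getD k [], ?_, by simpa using hkm⟩
          rw [List.getD_eq_getElem t [] (by simpa using hk)]
          exact List.getElem_mem _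
        omega
    · intro h
      have hpos : 0 < pvCnt t tup := by omega
      rw [pvCnt, List.countP_pos_iff] at hpos
      obtain ⟨sub, hsub, hp⟩ := hpos
      obtain ⟨k, hk, rfl⟩ := List.getElem_of_mem hsub
      refine ⟨k + 1, by simpa using hk, by omega, ?_⟩
      simp only [List.getD_cons_succ]
      rw [List.getD_eq_getElem t [] hk]
      simpa using hp
  | a :: t, m + 1, hm, hmem => by
    simp only [List.getD_cons_succ] at hmem
    have hm' : m < t.length := by simpa using hm
    by_cases ha : tup ∈ a
    · have hcnt : pvCnt (a :: t) tup = pvCnt t tup + 1 := by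
        simp [pvCnt, ha]
      have ht : 0 < pvCnt t tup := by
        rw [pvCnt, List.countP_pos_iff]
        refine ⟨t.getD m [], ?_, by simpa using hmem⟩
        rw [List.getD_eq_getElem t [] hm']
        exact List.getElem_mem _
      constructor
      · intro _; omega
      · intro _; exact ⟨0, by simp, by omega, by simpa using ha⟩
    · have hcnt : pvCnt (a :: t) tup = pvCnt t tup := by
        simp [pvCnt, ha]
      rw [hcnt, ← pv_count_two tup t m hm' hmem]
      constructor
      · rintro ⟨k, hk, hkm, hmemk⟩
        rcases k with _ | k
        · simp only [List.getD_cons_zero] at hmemk; exact absurd hmemk ha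
        · exact ⟨k, by simpa using hk, by omega, by simpa using hmemk⟩
      · rintro ⟨k, hk, hkm, hmemk⟩
        exact ⟨k + 1, by simpa using hk, by omega, by simpa using hmemk⟩

lemma pvKeepA_cast (lst : List (List (List Int))) (k : Nat) (hk : k < lst.length) :
    pvKeepA lst (k : Int) = pvKeep lst (lst.getD k []) := by
  unfold pvKeepA pvKeep
  rw [PySem.List.pyGetD_natCast]
  congr 1
  apply pv_all_congr
  intro tup htup
  rw [Bool.eq_iff_iff, PySem.Set.contains_iff, decide_eq_true_iff]
  unfold pvOther
  rw [pv_mem_other]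
  rw [← pv_count_two tup lst k hk htup]
  constructor
  · rintro (hs | ⟨j, hj, hji, hmem⟩)
    · simp [PySem.Set.empty] at hs
    · rw [PySem.List.mem_pyRange_one] at hj
      obtain ⟨hj0, hjn⟩ := hj
      refine ⟨j.toNat, by omega, fun h => hji (by omega), ?_⟩
      rwa [show j = ((j.toNat : Nat) : Int) by omega, PySem.List.pyGetD_natCast] at hmem
  · rintro ⟨k', hk', hkk, hmem⟩
    refine Or.inr ⟨(k' : Int), ?_, ?_, ?_⟩
    · rw [PySem.List.mem_pyRange_one]; constructor <;> omega
    · intro h; apply hkk; omega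
    · rwa [PySem.List.pyGetD_natCast]

lemma pv_filter_range (q : List (List Int) → Bool) :
    ∀ (lst : List (List (List Int))),
    ((List.range lst.length).filter (fun k => q (lst.getD k []))).map (fun k => lst.getD k []) = lst.filter q
  | [] => by simp
  | a :: t => by
    simp only [List.length_cons, List.range_succ_eq_map, List.filter_cons, List.getD_cons_zero,
      List.filter_map]
    by_cases hq : q a <;>
      simp [hq, Function.comp_def, Nat.succ_eq_add_one, List.getD_cons_succ, List.getD_cons_zero,
        -List.getD_eq_getElem?_getD, pv_filter_range q t]

lemma pvA_eq (lst : List (List (List Int))) :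
    remove_redundant_sublists lst
      = ((List.range lst.length).filter (fun k => pvKeep lst (lst.getD k []))).map
          (fun k => lst.getD k []) := by
  have h0 : remove_redundant_sublists lst
      = [] ++ ((PySem.List.pyRange 0 (lst.length : Int) 1).filter (pvKeepA lst)).map
          (fun i => PySem.List.pyGetD lst i []) := by
    unfold remove_redundant_sublists pvKeepA pvOther
    exact PySem.List.foldl_append_if _ _ _ _
  rw [h0, List.nil_append, pv_pyRange_cast, List.filter_map, List.map_map]
  have hfc : (List.range lst.length).filter (pvKeepA lst ∘ (Nat.cast : Nat → Int))
      = (List.range lst.length).filter (fun k => pvKeep lst (lst.getD k [])) :=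
    List.filter_congr (fun k hk => by
      simp only [Function.comp_def]
      exact pvKeepA_cast lst k (List.mem_range.mp hk))
  rw [hfc]
  apply List.map_congr_left
  intro k hk
  have : k < lst.length := List.mem_range.mp (List.mem_of_mem_filter hk)
  simp only [Function.comp_def, PySem.List.pyGetD_natCast]

-- ===== VERDICT (by name: the statement is the Claim_ definition above) =====
theorem remove_redundant_sublists_spec : Claim_equal_remove_redundant_sublists := by
  intro lst _
  unfold Spec_remove_redundant_sublists
  rw [pvA_eq, pvB_eq, pv_filter_range]
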